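-- pv_equiv track=rewrite | github.com/move-geun/baekjoon_py | 프로그래머스/2/135807. 숫자 카드 나누기/숫자 카드 나누기.py | solution
-- ===== SOURCE A (Python) =====
-- def solution(arrayA, arrayB):
--     answer = 0
--     def gcd(a,b):
--         r = a%b
--         if r==0:
--             return b
--         return gcd(b,r)
--
--     def cd(a):
--         lst = []
--         for i in range(1, a+1):
--             if a%i==0:
--                 lst.append(i)
--         return lst[1:]
--
--     idx = 1
--     a = arrayA[0]
--     b = arrayB[0]
--
--     while idx < len(arrayA):
--         a = gcd(a, arrayA[idx])
--         b = gcd(b, arrayB[idx])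
--         idx+=1
--
--     acd = cd(a)
--     bcd = cd(b)
--     acd.sort(reverse=True)
--     bcd.sort(reverse=True)
--
--     if acd:
--         for i in acd:
--             for b in arrayB:
--                 if b%i==0:
--                     break
--             else:
--                 answer = max(i, answer)
--     if bcd:
--         for j in bcd:
--             for a in arrayA:
--                 if a%j==0:
--                     break
--             else:
--                 answer = max(j, answer)
--     return answer
-- ===== SOURCE B (Python) =====
-- # B: only the full gcd of each array can qualify (any smaller common divisor of
-- # arrayA divides gcd(arrayA), so if gcd(arrayA) divides some element of arrayB the
-- # smaller one does too); so B skips A's divisor enumeration + sort entirely.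
-- def solution(arrayA, arrayB):
--     def g(x, y):
--         while y:
--             x, y = y, x % y
--         return x
--
--     ga = gb = 0
--     for x, y in zip(arrayA, arrayB):
--         ga = g(ga, x)
--         gb = g(gb, y)
--
--     ans = ga if ga > 1 and all(x % ga for x in arrayB) else 0
--     if gb > 1 and all(x % gb for x in arrayA):
--         ans = max(ans, gb)
--     return ans
-- ===== Notes on version B (the rewrite author's own statement) =====
-- stated objective: faster
-- what changed: Instead of enumerating, sorting and testing every divisor of each gcd against the other array, B pairs the arrays with zip, folds the two gcds in one pass, and tests only the gcd itself (a smaller divisor divides every element the gcd divides), removing the O(gcd) divisor enumeration, the sort and the divisor-times-array nested scan.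
import Mathlib
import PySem

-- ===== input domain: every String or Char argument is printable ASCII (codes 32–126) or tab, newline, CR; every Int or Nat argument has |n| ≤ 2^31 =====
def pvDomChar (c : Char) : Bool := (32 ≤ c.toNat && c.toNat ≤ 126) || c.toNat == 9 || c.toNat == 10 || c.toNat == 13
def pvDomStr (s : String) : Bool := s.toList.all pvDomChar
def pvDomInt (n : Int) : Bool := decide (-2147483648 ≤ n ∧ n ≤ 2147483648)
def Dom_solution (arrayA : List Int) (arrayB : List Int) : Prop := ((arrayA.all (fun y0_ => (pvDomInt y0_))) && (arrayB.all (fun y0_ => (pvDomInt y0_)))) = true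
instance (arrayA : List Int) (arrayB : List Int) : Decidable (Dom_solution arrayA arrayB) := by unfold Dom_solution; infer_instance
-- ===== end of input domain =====

-- B drops A's divisor enumeration + sort: only the gcd itself can be a valid divisor (objective: faster).

-- termination helper for both gcd ports (cited in decreasing_by)
theorem pvNatAbs_pymod_lt (a b : Int) (hb : b ≠ 0) : (PySem.Int.mod a b).natAbs < b.natAbs := by
  rcases lt_or_gt_of_ne hb with h | h
  · have := PySem.Int.mod_neg_bounds a h
    omega
  · have h1 := PySem.Int.mod_nonneg a h
    have h2 := PySem.Int.mod_lt a h
    omega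

-- ===== PORT A =====
-- A's recursive gcd; Python raises ZeroDivisionError at a % 0 (b = 0), excluded by Pre_
def pyGcdA (a b : Int) : Int :=
  if _hb : b = 0 then 0
  else
    let r := PySem.Int.mod a b
    if r = 0 then b else pyGcdA b r
termination_by b.natAbs
decreasing_by exact pvNatAbs_pymod_lt a b _hb

-- A's cd: divisors of a collected from range(1, a+1), then lst[1:]
def cdA (a : Int) : List Int :=
  let lst := (PySem.List.pyRange 1 (a + 1)).foldl
      (fun lst i => if PySem.Int.mod a i == 0 then lst ++ [i] else lst) []
  PySem.List.slice lst (some 1) none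

def solution (arrayA : List Int) (arrayB : List Int) : Int :=
  -- arrayA[0] / arrayB[0]: IndexError on an empty list, excluded by Pre_ (pyGetD is the total form)
  let a := PySem.List.pyGetD arrayA 0 0
  let b := PySem.List.pyGetD arrayB 0 0
  -- the while loop: idx = 1,...,len(arrayA)-1; arrayB[idx] IndexError when arrayB is shorter (excluded by Pre_)
  let st := (PySem.List.pyRange 1 (PySem.List.len arrayA)).foldl
      (fun (ab : Int × Int) idx =>
        (pyGcdA ab.1 (PySem.List.pyGetD arrayA idx 0), pyGcdA ab.2 (PySem.List.pyGetD arrayB idx 0))) (a, b)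
  let acd := PySem.List.sorted (cdA st.1) (fun x => x) true
  let bcd := PySem.List.sorted (cdA st.2) (fun x => x) true
  let answer : Int := 0
  -- inner 'for b in arrayB: if b % i == 0: break / else:' fires its else iff no element is divisible
  let answer := if acd ≠ [] then
      acd.foldl (fun ans i => if arrayB.all (fun b => PySem.Int.mod b i != 0) then max i ans else ans) answer
    else answer
  let answer := if bcd ≠ [] then
      bcd.foldl (fun ans j => if arrayA.all (fun a => PySem.Int.mod a j != 0) then max j ans else ans) answer
    else answer
  answer

-- ===== PORT B =====
-- B's iterative gcd (the while loop as tail recursion over the same state)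
def pyGcdB (x y : Int) : Int :=
  if _hy : y = 0 then x else pyGcdB y (PySem.Int.mod x y)
termination_by y.natAbs
decreasing_by exact pvNatAbs_pymod_lt x y _hy

def solution_alt (arrayA : List Int) (arrayB : List Int) : Int :=
  let gs := (arrayA.zip arrayB).foldl (fun p xy => (pyGcdB p.1 xy.1, pyGcdB p.2 xy.2)) (0, 0)
  let ans : Int := if 1 < gs.1 ∧ arrayB.all (fun x => PySem.Int.mod x gs.1 != 0) then gs.1 else 0
  if 1 < gs.2 ∧ arrayA.all (fun x => PySem.Int.mod x gs.2 != 0) then max ans gs.2 else ans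

-- ===== PRECONDITION & SPEC =====
-- Pre_ excludes exactly the inputs on which A raises: an empty arrayA (IndexError at arrayA[0]), an arrayB
-- shorter than arrayA (IndexError in the while loop over arrayA's indices), and a zero among the gcd arguments
-- A's loop actually visits (ZeroDivisionError at a % 0).
def Pre_solution (arrayA : List Int) (arrayB : List Int) : Prop :=
  arrayA ≠ [] ∧ arrayA.length ≤ arrayB.length ∧
    (∀ x ∈ arrayA.tail, x ≠ 0) ∧ (∀ x ∈ (arrayB.take arrayA.length).tail, x ≠ 0)
instance (arrayA : List Int) (arrayB : List Int) : Decidable (Pre_solution arrayA arrayB) := by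
  unfold Pre_solution; infer_instance

def pvWitness_solution : List Int × List Int := ([2, 4], [3, 9])

def Spec_solution (arrayA : List Int) (arrayB : List Int) (out : Int) : Prop := out = solution_alt arrayA arrayB
instance (arrayA : List Int) (arrayB : List Int) (out : Int) : Decidable (Spec_solution arrayA arrayB out) := by
  unfold Spec_solution; infer_instance

-- ===== CLAIM (what is proved, stated in full; the proofs are below) =====
def Claim_equal_solution : Prop := ∀ (arrayA : List Int) (arrayB : List Int), Dom_solution arrayA arrayB → Pre_solution arrayA arrayB → Spec_solution arrayA arrayB (solution arrayA arrayB)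

-- ===== LEMMAS AND PROOFS =====

-- the two gcds agree whenever the second argument is nonzero (Python raises otherwise)
theorem pyGcdA_eq_pyGcdB_aux : ∀ (n : Nat) (a b : Int), b.natAbs < n → b ≠ 0 → pyGcdA a b = pyGcdB a b := by
  intro n
  induction n with
  | zero => intro a b h _; omega
  | succ n ih =>
    intro a b h hb
    rw [pyGcdA, pyGcdB]
    simp only [hb, dite_false]
    by_cases hr : PySem.Int.mod a b = 0
    · rw [if_pos hr, hr, pyGcdB]; simp
    · rw [if_neg hr]
      exact ih b (PySem.Int.mod a b) (by have := pvNatAbs_pymod_lt a b hb; omega) hr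

theorem pyGcdA_eq_pyGcdB (a b : Int) (hb : b ≠ 0) : pyGcdA a b = pyGcdB a b :=
  pyGcdA_eq_pyGcdB_aux (b.natAbs + 1) a b (by omega) hb

theorem pyGcdB_zero_left (x : Int) : pyGcdB 0 x = x := by
  rw [pyGcdB]
  by_cases hx : x = 0
  · simp [hx]
  · have h0 : PySem.Int.mod 0 x = 0 := (PySem.Int.mod_eq_zero_iff_dvd 0 x).mpr (dvd_zero x)
    simp only [hx, dite_false, h0]
    rw [pyGcdB]; simp

theorem foldl_gcdA_eq_gcdB (t : List Int) (ht : ∀ x ∈ t, x ≠ 0) :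
    ∀ a : Int, t.foldl pyGcdA a = t.foldl pyGcdB a := by
  induction t with
  | nil => intro a; rfl
  | cons x t ih =>
    intro a
    simp only [List.foldl_cons]
    rw [pyGcdA_eq_pyGcdB a x (ht x List.mem_cons_self)]
    exact ih (fun y hy => ht y (List.mem_cons_of_mem x hy)) _

-- cd as a filtered range
theorem cdA_eq_filter (a : Int) :
    cdA a = ((PySem.List.pyRange 1 (a + 1)).filter (fun i => PySem.Int.mod a i == 0)).tail := by
  unfold cdA
  rw [PySem.List.foldl_append_if (fun i => PySem.Int.mod a i == 0) (fun i => i)]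
  simp [PySem.List.slice_from_one]

theorem cdA_eq_nil (a : Int) (h : a ≤ 1) : cdA a = [] := by
  rw [cdA_eq_filter]
  rcases lt_or_eq_of_le h with h1 | h1
  · rw [PySem.List.pyRange_one_eq_nil (by omega)]; rfl
  · subst h1
    rw [PySem.List.pyRange_one_cons (by omega), PySem.List.pyRange_one_eq_nil (by omega)]
    simp

theorem mem_cdA (a i : Int) (ha : 1 < a) : i ∈ cdA a ↔ 2 ≤ i ∧ i ≤ a ∧ i ∣ a := by
  rw [cdA_eq_filter, PySem.List.pyRange_one_cons (by omega : (1:Int) < a + 1)]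
  have h1 : PySem.Int.mod a 1 = 0 := (PySem.Int.mod_eq_zero_iff_dvd a 1).mpr (one_dvd a)
  simp only [List.filter_cons, h1]
  simp only [beq_self_eq_true, if_pos, List.tail_cons]
  rw [List.mem_filter]
  simp only [PySem.List.mem_pyRange_one, beq_iff_eq, PySem.Int.mod_eq_zero_iff_dvd]
  exact ⟨fun ⟨⟨h1, h2⟩, h3⟩ => ⟨h1, by omega, h3⟩, fun ⟨h1, h2, h3⟩ => ⟨⟨h1, by omega⟩, h3⟩⟩

-- running-max-over-qualifying-elements loop, characterised by four facts
theorem foldmax_init_le (q : Int → Bool) (L : List Int) :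
    ∀ init : Int, init ≤ L.foldl (fun ans i => if q i then max i ans else ans) init := by
  induction L with
  | nil => intro init; simp
  | cons x t ih =>
    intro init
    simp only [List.foldl_cons]
    refine le_trans ?_ (ih _)
    split <;> omega

theorem foldmax_le (q : Int → Bool) (L : List Int) (m : Int) (hm : ∀ i ∈ L, i ≤ m) :
    ∀ init : Int, init ≤ m → L.foldl (fun ans i => if q i then max i ans else ans) init ≤ m := by
  induction L with
  | nil => intro init h; simpa
  | cons x t ih =>
    intro init h
    simp only [List.foldl_cons]
    refine ih (fun i hi => hm i (List.mem_cons_of_mem x hi)) _ ?_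
    have := hm x List.mem_cons_self
    split <;> omega

theorem foldmax_ge (q : Int → Bool) (L : List Int) (g : Int) (hg : g ∈ L) (hq : q g = true) :
    ∀ init : Int, g ≤ L.foldl (fun ans i => if q i then max i ans else ans) init := by
  induction L with
  | nil => cases hg
  | cons x t ih =>
    intro init
    simp only [List.foldl_cons]
    rcases List.mem_cons.mp hg with rfl | hg'
    · rw [hq]
      refine le_trans ?_ (foldmax_init_le q t _)
      simp
    · exact ih hg' _

theorem foldmax_none (q : Int → Bool) (L : List Int) (hL : ∀ i ∈ L, q i = false) :
    ∀ init : Int, L.foldl (fun ans i => if q i then max i ans else ans) init = init := by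
  induction L with
  | nil => intro init; rfl
  | cons x t ih =>
    intro init
    simp only [List.foldl_cons, hL x List.mem_cons_self]
    exact ih (fun i hi => hL i (List.mem_cons_of_mem x hi)) init

-- one stage of A's answer loop equals B's single test of the gcd
theorem stage_eq (g : Int) (other : List Int) (init : Int) :
    (if PySem.List.sorted (cdA g) (fun x => x) true ≠ [] then
        (PySem.List.sorted (cdA g) (fun x => x) true).foldl
          (fun ans i => if other.all (fun b => PySem.Int.mod b i != 0) then max i ans else ans) init
      else init)
      = if 1 < g ∧ other.all (fun x => PySem.Int.mod x g != 0) then max init g else init := by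
  by_cases hg : 1 < g
  · by_cases hq : (other.all (fun x => PySem.Int.mod x g != 0)) = true
    · have hmem : g ∈ PySem.List.sorted (cdA g) (fun x => x) true :=
        (PySem.List.mem_sorted _ _ _ _).mpr ((mem_cdA g g hg).mpr ⟨by omega, le_refl g, dvd_refl g⟩)
      have hne : PySem.List.sorted (cdA g) (fun x => x) true ≠ [] := by
        intro h; rw [h] at hmem; cases hmem
      rw [if_pos hne, if_pos (⟨hg, hq⟩ : 1 < g ∧ (other.all (fun x => PySem.Int.mod x g != 0)) = true)]
      have hle : ∀ i ∈ PySem.List.sorted (cdA g) (fun x => x) true, i ≤ max init g := by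
        intro i hi
        have := ((mem_cdA g i hg).mp ((PySem.List.mem_sorted _ _ _ _).mp hi)).2.1
        omega
      have h1 := foldmax_le (fun i => other.all (fun b => PySem.Int.mod b i != 0)) _ (max init g) hle init (le_max_left _ _)
      have h2 := foldmax_ge (fun i => other.all (fun b => PySem.Int.mod b i != 0)) _ g hmem hq init
      have h3 := foldmax_init_le (fun i => other.all (fun b => PySem.Int.mod b i != 0)) (PySem.List.sorted (cdA g) (fun x => x) true) init
      simp only [] at h1 h2 h3
      omega
    · have hcond : ¬(1 < g ∧ (other.all (fun x => PySem.Int.mod x g != 0)) = true) := by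
        rintro ⟨-, h⟩; exact hq h
      rw [if_neg hcond]
      -- some element of other is divisible by g, hence by every divisor in cd(g)
      rw [Bool.not_eq_true] at hq
      obtain ⟨x, hx, hxg⟩ : ∃ x ∈ other, PySem.Int.mod x g = 0 := by
        rw [List.all_eq_false] at hq
        simpa using hq
      have hdvd : g ∣ x := (PySem.Int.mod_eq_zero_iff_dvd x g).mp hxg
      have hfalse : ∀ i ∈ PySem.List.sorted (cdA g) (fun x => x) true,
          (other.all (fun b => PySem.Int.mod b i != 0)) = false := by
        intro i hi
        have hid : i ∣ g := ((mem_cdA g i hg).mp ((PySem.List.mem_sorted _ _ _ _).mp hi)).2.2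
        rw [List.all_eq_false]
        refine ⟨x, hx, ?_⟩
        simp [PySem.Int.mod_eq_zero_iff_dvd, hid.trans hdvd]
      by_cases hne : PySem.List.sorted (cdA g) (fun x => x) true = []
      · rw [if_neg (by simpa using hne)]
      · rw [if_pos hne]
        exact foldmax_none _ _ hfalse init
  · have hcond : ¬(1 < g ∧ (other.all (fun x => PySem.Int.mod x g != 0)) = true) := by
      rintro ⟨h, -⟩; exact hg h
    rw [if_neg hcond]
    have hnil : cdA g = [] := cdA_eq_nil g (by omega)
    rw [if_neg (by simp [hnil, PySem.List.sorted_eq_nil_iff])]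

-- B's gcd fold over a list equals A's fold over the tail started at the head
theorem foldl_gcdB_cons (a0 : Int) (t : List Int) :
    (a0 :: t).foldl pyGcdB 0 = t.foldl pyGcdB a0 := by
  simp [List.foldl_cons, pyGcdB_zero_left]

-- zip pairs each element of arrayA with the matching prefix of arrayB
theorem pv_map_snd_zip : ∀ (l1 l2 : List Int),
    List.map Prod.snd (l1.zip l2) = l2.take l1.length := by
  intro l1
  induction l1 with
  | nil => intro l2; simp
  | cons x t ih =>
    intro l2
    cases l2 with
    | nil => simp
    | cons y s => simp [ih]

-- ===== VERDICT (by name: the statement is the Claim_ definition above) =====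
theorem solution_spec : Claim_equal_solution := by
  intro arrayA arrayB _hdom hpre
  obtain ⟨hA, hlen, hta, htb⟩ := hpre
  obtain ⟨a0, ta, rfl⟩ := List.exists_cons_of_ne_nil hA
  have hBne : arrayB ≠ [] := by
    intro h; subst h; simp at hlen
  obtain ⟨b0, tb, rfl⟩ := List.exists_cons_of_ne_nil hBne
  simp only [List.tail_cons] at hta
  simp only [List.length_cons, List.take_succ_cons, List.tail_cons] at htb
  have hlen' : ta.length ≤ tb.length := by simpa using hlen
  unfold Spec_solution
  dsimp only [solution, solution_alt]
  -- A's paired index loop, componentwise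
  rw [PySem.List.foldl_prod_mk
        (fun s j => pyGcdA s (PySem.List.pyGetD (a0 :: ta) j 0))
        (fun s j => pyGcdA s (PySem.List.pyGetD (b0 :: tb) j 0))]
  rw [PySem.List.foldl_pyRange_pyGetD (a0 :: ta) 0 pyGcdA _ (by norm_num)]
  have hcongr : ∀ (acc : Int), ∀ j ∈ PySem.List.pyRange 1 (PySem.List.len (a0 :: ta)),
      pyGcdA acc (PySem.List.pyGetD (b0 :: tb) j 0)
        = pyGcdA acc (PySem.List.pyGetD ((b0 :: tb).take (a0 :: ta).length) j 0) := by
    intro acc j hj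
    rw [PySem.List.mem_pyRange_one, PySem.List.len_eq] at hj
    have h0 : (0 : Int) ≤ j := by omega
    rw [PySem.List.pyGetD_of_nonneg _ _ h0, PySem.List.pyGetD_of_nonneg _ _ h0]
    obtain ⟨m, hm⟩ : ∃ m, j.toNat = m + 1 := ⟨j.toNat - 1, by omega⟩
    have hmn : m < ta.length := by simp [List.length_cons] at hj; omega
    simp [List.getD, hm, hmn]
  rw [PySem.List.foldl_congr_mem _ _ _ _ hcongr]
  rw [show PySem.List.len (a0 :: ta) = PySem.List.len ((b0 :: tb).take (a0 :: ta).length) by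
        simp [PySem.List.len_eq, List.length_take]
        omega]
  rw [PySem.List.foldl_pyRange_pyGetD ((b0 :: tb).take (a0 :: ta).length) 0 pyGcdA _ (by norm_num)]
  -- B's zip loop, componentwise
  rw [PySem.List.foldl_prod_mk
        (fun s (e : Int × Int) => pyGcdB s e.1)
        (fun s (e : Int × Int) => pyGcdB s e.2) ((a0 :: ta).zip (b0 :: tb)) 0 0]
  rw [show List.foldl (fun s (e : Int × Int) => pyGcdB s e.1) 0 ((a0 :: ta).zip (b0 :: tb))
        = List.foldl pyGcdB 0 (List.map Prod.fst ((a0 :: ta).zip (b0 :: tb))) from List.foldl_map.symm]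
  rw [show List.foldl (fun s (e : Int × Int) => pyGcdB s e.2) 0 ((a0 :: ta).zip (b0 :: tb))
        = List.foldl pyGcdB 0 (List.map Prod.snd ((a0 :: ta).zip (b0 :: tb))) from List.foldl_map.symm]
  rw [List.map_fst_zip hlen, pv_map_snd_zip]
  -- both gcd folds over the same elements
  simp only [PySem.List.pyGetD_zero_cons, Int.toNat_one, List.drop_one, List.tail_cons,
    List.length_cons, List.take_succ_cons]
  rw [foldl_gcdA_eq_gcdB ta hta a0, foldl_gcdA_eq_gcdB (tb.take ta.length) htb b0]
  rw [foldl_gcdB_cons a0 ta, foldl_gcdB_cons b0 (tb.take ta.length)]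
  set ga := ta.foldl pyGcdB a0 with hga
  set gb := (tb.take ta.length).foldl pyGcdB b0 with hgb
  rw [stage_eq ga (b0 :: tb) 0, stage_eq gb (a0 :: ta) _]
  by_cases h1 : 1 < ga ∧ (b0 :: tb).all (fun x => PySem.Int.mod x ga != 0) = true
  · rw [if_pos h1, if_pos h1]
    by_cases h2 : 1 < gb ∧ (a0 :: ta).all (fun x => PySem.Int.mod x gb != 0) = true
    · rw [if_pos h2, if_pos h2]
      omega
    · rw [if_neg h2, if_neg h2]
      omega
  · rw [if_neg h1, if_neg h1]
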